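-- pv_equiv track=rewrite | github.com/jyjnote/Coding_test | 프로그래머스/lv1/12922. 수박수박수박수박수박수？/수박수박수박수박수박수？.py | solution
-- ===== SOURCE A (Python) =====
-- def solution(n):
--     answer=''
--     a=['수','박']
--     for i in range(n):
--         if i%2==0:
--             answer+=a[0]
--         else:
--             answer+=a[1]
--     return answer
-- ===== SOURCE B (Python) =====
-- def solution(n):
--     return ("수박" * ((n + 1) // 2))[:n]
-- ===== Notes on version B (the rewrite author's own statement) =====
-- stated objective: idiomatic
-- what changed: Replaces the per-index loop with parity branching and list indexing by a closed form: replicate the two-character unit ceil(n/2) times and slice to length n.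
import Mathlib
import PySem

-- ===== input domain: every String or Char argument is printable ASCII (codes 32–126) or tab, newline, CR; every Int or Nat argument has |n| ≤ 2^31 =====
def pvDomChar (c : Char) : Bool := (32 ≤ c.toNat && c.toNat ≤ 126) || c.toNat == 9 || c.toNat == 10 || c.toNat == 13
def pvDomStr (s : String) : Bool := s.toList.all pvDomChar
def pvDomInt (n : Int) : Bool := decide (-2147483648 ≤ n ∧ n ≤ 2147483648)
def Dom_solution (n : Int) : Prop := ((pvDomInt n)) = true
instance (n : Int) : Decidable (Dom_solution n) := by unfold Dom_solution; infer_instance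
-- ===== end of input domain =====

-- B replaces A's per-index loop (parity branch + list indexing) by the closed form
-- "수박" * ((n+1)//2) sliced to length n; same return value for every int n.

-- ===== PORT A =====
-- answer is kept as a List Char (Python str concatenation), turned into a String at return.
def solution (n : Int) : String :=
  let a : List (List Char) := ["수".toList, "박".toList]
  String.ofList <|
    (PySem.List.pyRange 0 n 1).foldl
      (fun answer i =>
        if PySem.Int.mod i 2 == 0 then
          answer ++ PySem.List.pyGetD a 0 []
        else
          answer ++ PySem.List.pyGetD a 1 []) []

-- ===== PORT B =====
-- Python string repetition "수박" * k (empty for k ≤ 0).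
def strMul (s : List Char) : Nat → List Char
  | 0 => []
  | k + 1 => s ++ strMul s k

def solution_alt (n : Int) : String :=
  String.ofList (PySem.List.slice (strMul "수박".toList (PySem.Int.floordiv (n + 1) 2).toNat) none (some n))

-- ===== PRECONDITION & SPEC =====
def Spec_solution (n : Int) (out : String) : Prop := out = solution_alt n
instance (n : Int) (out : String) : Decidable (Spec_solution n out) := by unfold Spec_solution; infer_instance

-- ===== CLAIM (what is proved, stated in full; the proofs are below) =====
def Claim_equal_solution : Prop := ∀ (n : Int), Dom_solution n → Spec_solution n (solution n)

-- ===== LEMMAS AND PROOFS =====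

-- the alternating character at index i
def altChar (i : Nat) : Char := if i % 2 = 0 then '수' else '박'

lemma strMul_eq_map_range (k : Nat) :
    strMul "수박".toList k = (List.range (2 * k)).map altChar := by
  induction k with
  | zero => simp [strMul]
  | succ k ih =>
    have h2 : 2 * (k + 1) = (2 * k + 1) + 1 := by ring
    rw [strMul, ih, h2, List.range_succ_eq_map, List.range_succ_eq_map]
    simp only [List.map_cons, List.map_map]
    have : (List.range (2 * k)).map (altChar ∘ Nat.succ ∘ Nat.succ)
         = (List.range (2 * k)).map altChar := by
      apply List.map_congr_left
      intro i _
      simp only [Function.comp, altChar, Nat.succ_eq_add_one]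
      split_ifs with h1 h2 <;> first | rfl | omega
    rw [this]
    simp [altChar]

lemma foldl_alt (m : Nat) :
    (PySem.List.pyRange 0 (m : Int) 1).foldl
      (fun answer i =>
        if PySem.Int.mod i 2 == 0 then
          answer ++ PySem.List.pyGetD ["수".toList, "박".toList] 0 []
        else
          answer ++ PySem.List.pyGetD ["수".toList, "박".toList] 1 []) []
    = (List.range m).map altChar := by
  induction m with
  | zero => simp
  | succ m ih =>
    have hcast : ((m : Int) + 1) = ((m + 1 : Nat) : Int) := by push_cast; ring
    rw [← hcast, PySem.List.pyRange_one_succ_right (by positivity), List.foldl_append, ih,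
        List.range_succ, List.map_append]
    by_cases h : m % 2 = 0
    · simp [h, altChar, PySem.List.pyGetD]
      omega
    · simp [h, altChar, PySem.List.pyGetD]
      omega

-- ===== VERDICT (by name: the statement is the Claim_ definition above) =====
theorem solution_spec : Claim_equal_solution := by
  intro n _
  simp only [Spec_solution, solution, solution_alt]
  rcases le_or_gt n 0 with hn | hn
  · -- n ≤ 0: both sides are the empty string
    have h1 : PySem.List.pyRange 0 n 1 = [] := PySem.List.pyRange_one_eq_nil hn
    have h2 : (PySem.Int.floordiv (n + 1) 2).toNat = 0 := by
      have : PySem.Int.floordiv (n + 1) 2 ≤ 0 := by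
        simp only [PySem.Int.floordiv, Int.fdiv_eq_ediv]
        omega
      omega
    rw [h1, h2]
    simp [strMul, PySem.List.slice]
  · -- n > 0: write n as a natural number m
    obtain ⟨m, rfl⟩ : ∃ m : Nat, n = (m : Int) := ⟨n.toNat, (Int.toNat_of_nonneg hn.le).symm⟩
    have hfd : PySem.Int.floordiv ((m : Int) + 1) 2 = (((m + 1) / 2 : Nat) : Int) := by
      have : ((m : Int) + 1) = ((m + 1 : Nat) : Int) := by push_cast; ring
      simp [PySem.Int.floordiv, Int.fdiv_eq_ediv]
    rw [foldl_alt, hfd, Int.toNat_natCast, strMul_eq_map_range,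
        PySem.List.slice_to_natCast, ← List.map_take, List.take_range]
    have : min m (2 * ((m + 1) / 2)) = m := by omega
    rw [this]
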